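-- pv_equiv track=rewrite | github.com/hdahlber/Advent-of-Code-2024 | Day_14/solution_14.py | has_consecutive_robots
-- ===== SOURCE A (Python) =====
-- def has_consecutive_robots(row, count):
--     max_consecutive = 0
--     consecutive = 0
--     for cell in row:
--         if cell == 'X':
--             consecutive += 1
--             max_consecutive = max(max_consecutive, consecutive)
--         else:
--             consecutive = 0
--     return max_consecutive >= count
-- ===== SOURCE B (Python) =====
-- def has_consecutive_robots(row, count):
--     # Partition the row into maximal runs of equal cells, then compare the
--     # longest 'X'-run against count.
--     runs = []
--     i = 0
--     n = len(row)
--     while i < n: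
--         j = i
--         while j < n and row[j] == row[i]:
--             j += 1
--         runs.append((row[i], j - i))
--         i = j
--     return max((l for v, l in runs if v == 'X'), default=0) >= count
-- ===== Notes on version B (the rewrite author's own statement) =====
-- stated objective: alternative
-- what changed: Replaces the stateful per-cell max/current-run counter with a run-length decomposition: the row is split into maximal runs of equal cells and the maximum length among 'X' runs is compared to count.
import Mathlib
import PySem

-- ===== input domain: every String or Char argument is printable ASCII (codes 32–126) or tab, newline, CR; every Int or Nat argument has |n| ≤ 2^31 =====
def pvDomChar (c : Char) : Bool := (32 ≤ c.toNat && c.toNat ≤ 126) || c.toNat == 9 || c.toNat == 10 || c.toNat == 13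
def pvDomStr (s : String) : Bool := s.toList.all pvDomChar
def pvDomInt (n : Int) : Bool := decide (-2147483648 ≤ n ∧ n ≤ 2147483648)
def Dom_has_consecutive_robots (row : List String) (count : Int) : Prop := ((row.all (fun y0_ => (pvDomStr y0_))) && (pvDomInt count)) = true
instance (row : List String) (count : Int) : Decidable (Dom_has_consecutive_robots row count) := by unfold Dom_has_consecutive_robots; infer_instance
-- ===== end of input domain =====

-- B changes the decomposition (maximal equal runs, then longest 'X' run) rather than
-- A's stateful per-cell counter; objective: alternative, same cost.

-- ===== PORT A =====
-- A's loop: state (max_consecutive, consecutive), updated per cell.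
def has_consecutive_robots (row : List String) (count : Int) : Bool :=
  let s := row.foldl
    (fun (s : Int × Int) cell =>
      if cell == "X" then (max s.1 (s.2 + 1), s.2 + 1) else (s.1, 0))
    (0, 0)
  decide (count ≤ s.1)

-- ===== PORT B =====
-- B's outer while-loop: peel off one maximal run (inner while = takeWhile/dropWhile).
def pvRuns (row : List String) : List (String × Int) :=
  match row with
  | [] => []
  | x :: xs =>
    (x, 1 + (xs.takeWhile (· == x)).length) :: pvRuns (xs.dropWhile (· == x))
termination_by row.length
decreasing_by
  simp only [List.length_cons]
  exact Nat.lt_succ_of_le (List.length_dropWhile_le _ _)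

def has_consecutive_robots_alt (row : List String) (count : Int) : Bool :=
  let runs := pvRuns row
  let m := (runs.filter (fun p => p.1 == "X")).foldl (fun a p => max a p.2) 0
  decide (count ≤ m)

-- ===== PRECONDITION & SPEC =====
def Spec_has_consecutive_robots (row : List String) (count : Int) (out : Bool) : Prop := out = has_consecutive_robots_alt row count
instance (row : List String) (count : Int) (out : Bool) : Decidable (Spec_has_consecutive_robots row count out) := by unfold Spec_has_consecutive_robots; infer_instance

-- ===== CLAIM (what is proved, stated in full; the proofs are below) =====
def Claim_equal_has_consecutive_robots : Prop := ∀ (row : List String) (count : Int), Dom_has_consecutive_robots row count → Spec_has_consecutive_robots row count (has_consecutive_robots row count)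

-- ===== LEMMAS AND PROOFS =====

-- Reference function: max 'X'-run length in l, given a pending current run of length c.
def pvA : List String → Int → Int
  | [], c => c
  | x :: xs, c => if x == "X" then pvA xs (c + 1) else max c (pvA xs 0)

theorem pvA_ge (l : List String) : ∀ c : Int, c ≤ pvA l c := by
  induction l with
  | nil => intro c; simp [pvA]
  | cons x xs ih =>
    intro c
    simp only [pvA]
    split
    · exact le_trans (by omega) (ih (c + 1))
    · exact le_max_left _ _

theorem pvA_foldl (l : List String) : ∀ m c : Int, 0 ≤ c → c ≤ m →
    (l.foldl (fun (s : Int × Int) cell =>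
      if cell == "X" then (max s.1 (s.2 + 1), s.2 + 1) else (s.1, 0)) (m, c)).1
    = max m (pvA l c) := by
  induction l with
  | nil => intro m c _ hcm; simp [pvA]; omega
  | cons x xs ih =>
    intro m c hc hcm
    simp only [List.foldl_cons, pvA]
    by_cases hx : (x == "X") = true
    · simp only [hx, if_true]
      rw [ih (max m (c + 1)) (c + 1) (by omega) (le_max_right _ _)]
      have h1 := pvA_ge xs (c + 1)
      omega
    · simp only [hx, Bool.false_eq_true, if_false]
      rw [ih m 0 le_rfl (by omega)]
      have h0 := pvA_ge xs 0
      omega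

theorem pv_foldl_max_shift (l : List (String × Int)) : ∀ a b : Int,
    l.foldl (fun a p => max a p.2) (max a b) = max a (l.foldl (fun a p => max a p.2) b) := by
  induction l with
  | nil => intro a b; rfl
  | cons x xs ih =>
    intro a b
    simp only [List.foldl_cons, max_assoc]
    exact ih a (max b x.2)

-- B's max over 'X' runs.
def pvMaxRun (row : List String) : Int :=
  ((pvRuns row).filter (fun p => p.1 == "X")).foldl (fun a p => max a p.2) 0

theorem pvMaxRun_nonneg (row : List String) : 0 ≤ pvMaxRun row := by
  unfold pvMaxRun
  generalize ((pvRuns row).filter (fun p => p.1 == "X")) = l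
  induction l with
  | nil => simp
  | cons x xs ih =>
    simp only [List.foldl_cons]
    calc (0:Int) ≤ xs.foldl (fun a p => max a p.2) 0 := ih
      _ ≤ _ := by
        rw [show max (0:Int) x.2 = max x.2 0 from max_comm _ _, pv_foldl_max_shift]
        exact le_max_right _ _

theorem pvA_skipX (t : List String) (rest : List String)
    (ht : ∀ y ∈ t, y = "X") : ∀ c : Int, pvA (t ++ rest) c = pvA rest (c + t.length) := by
  induction t with
  | nil => intro c; simp
  | cons y ys ih =>
    intro c
    have hy : y = "X" := ht y (by simp)
    simp only [List.cons_append, pvA, hy, beq_self_eq_true, if_true]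
    rw [ih (fun z hz => ht z (by simp [hz])) (c + 1)]
    congr 1
    simp
    omega

theorem pvA_notX_head (rest : List String)
    (h : ∀ y l, rest = y :: l → ¬ y = "X") : ∀ k : Int, 1 ≤ k → pvA rest k = max k (pvA rest 0) := by
  cases rest with
  | nil => intro k hk; simp [pvA]; omega
  | cons y l =>
    intro k hk
    have hy : ¬ y = "X" := h y l rfl
    simp only [pvA, beq_iff_eq, hy, if_false]
    have := pvA_ge l 0
    omega

theorem pvA_dropNotX (t : List String) (rest : List String)
    (ht : ∀ y ∈ t, ¬ y = "X") : pvA (t ++ rest) 0 = pvA rest 0 := by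
  induction t with
  | nil => simp
  | cons y ys ih =>
    have hy : ¬ y = "X" := ht y (by simp)
    simp only [List.cons_append, pvA, beq_iff_eq, hy, if_false]
    rw [ih (fun z hz => ht z (by simp [hz]))]
    have := pvA_ge rest 0
    omega

theorem pvMaxRun_cons (x : String) (xs : List String) :
    pvMaxRun (x :: xs) =
      if x = "X" then max (1 + ((xs.takeWhile (· == x)).length : Int)) (pvMaxRun (xs.dropWhile (· == x)))
      else pvMaxRun (xs.dropWhile (· == x)) := by
  unfold pvMaxRun
  rw [pvRuns]
  by_cases hx : x = "X"
  · simp only [hx, if_true, List.filter_cons, beq_self_eq_true, if_true, List.foldl_cons]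
    rw [show max (0:Int) (1 + ((xs.takeWhile (· == "X")).length : Int)) =
        max (1 + ((xs.takeWhile (· == "X")).length : Int)) 0 from max_comm _ _,
      pv_foldl_max_shift]
  · simp [hx]

theorem pvA_eq_maxRun (row : List String) : pvA row 0 = pvMaxRun row := by
  induction hn : row.length using Nat.strong_induction_on generalizing row with
  | _ n ih =>
    cases row with
    | nil => simp [pvA, pvMaxRun, pvRuns]
    | cons x xs =>
      have hsplit : xs = xs.takeWhile (· == x) ++ xs.dropWhile (· == x) :=
        (List.takeWhile_append_dropWhile).symm
      have hlen : (xs.dropWhile (· == x)).length < n := by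
        have := List.length_dropWhile_le (· == x) xs
        simp only [List.length_cons] at hn
        omega
      have hrec := ih _ hlen (xs.dropWhile (· == x)) rfl
      rw [pvMaxRun_cons]
      by_cases hx : x = "X"
      · subst hx
        rw [if_pos rfl]
        have htX : ∀ y ∈ (("X" : String) :: xs.takeWhile (· == "X")), y = "X" := by
          intro y hy
          rcases List.mem_cons.mp hy with h | h
          · simp [h]
          · have := List.mem_takeWhile_imp h
            simpa using this
        have : pvA (("X" : String) :: xs) 0 = pvA ((("X" : String) :: xs.takeWhile (· == "X")) ++ xs.dropWhile (· == "X")) 0 := by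
          rw [List.cons_append, ← hsplit]
        rw [this, pvA_skipX _ _ htX 0]
        have hhead : ∀ y l, xs.dropWhile (· == "X") = y :: l → ¬ y = "X" := by
          intro y l hyl hY
          have := List.head?_dropWhile_not (· == ("X" : String)) xs
          rw [hyl] at this
          simp [hY] at this
        rw [pvA_notX_head (xs.dropWhile (· == "X")) hhead
          (0 + (((("X" : String) :: xs.takeWhile (· == "X")).length : Nat) : Int))
          (by simp only [List.length_cons]; push_cast; omega), hrec]
        congr 1
        simp
        omega
      · rw [if_neg hx]
        have hN : ∀ y ∈ (x :: xs.takeWhile (· == x)), ¬ y = "X" := by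
          intro y hy
          rcases List.mem_cons.mp hy with h | h
          · simp [h, hx]
          · have := List.mem_takeWhile_imp h
            simp at this
            simp [this, hx]
        have : pvA (x :: xs) 0 = pvA ((x :: xs.takeWhile (· == x)) ++ xs.dropWhile (· == x)) 0 := by
          rw [List.cons_append, ← hsplit]
        rw [this, pvA_dropNotX _ _ hN, hrec]

-- ===== VERDICT (by name: the statement is the Claim_ definition above) =====
theorem has_consecutive_robots_spec : Claim_equal_has_consecutive_robots := by
  intro row count _
  unfold Spec_has_consecutive_robots has_consecutive_robots has_consecutive_robots_alt
  simp only
  rw [pvA_foldl row 0 0 le_rfl le_rfl, pvA_eq_maxRun]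
  have := pvMaxRun_nonneg row
  have hmax : max (0:Int) (pvMaxRun row) = pvMaxRun row := by omega
  rw [hmax]
  rfl
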